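-- pv_equiv track=rewrite | github.com/alexballera/laboratorio-fcen | clases/Clase-01-PythonPandas/practica01/ejercicios-preliminares.py | cadena_geringosa_while
-- ===== SOURCE A (Python) =====
-- def cadena_geringosa_while(palabra: str):
--     palabra_nueva = ''
--     i = 0
--     while len(palabra) > i:
--         if palabra[i] == 'a':
--             palabra_nueva += 'apa'
--         elif palabra[i] == 'e':
--             palabra_nueva += 'apa'
--         elif palabra[i] == 'i':
--             palabra_nueva += 'apa'
--         elif palabra[i]== 'o':
--             palabra_nueva += 'apa'
--         elif palabra[i] == 'u':
--             palabra_nueva += 'apa'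
--         else:
--             palabra_nueva += palabra[i]
--         i += 1
--
--     return palabra_nueva
-- ===== SOURCE B (Python) =====
-- def cadena_geringosa_while(palabra: str):
--     # Staged whole-string passes, one per vowel. Replacing 'a' FIRST is what
--     # makes this correct: 'apa' contains no vowel other than 'a', so the later
--     # passes for e/i/o/u never touch text inserted by an earlier pass.
--     res = palabra.replace('a', 'apa')
--     res = res.replace('e', 'apa')
--     res = res.replace('i', 'apa')
--     res = res.replace('o', 'apa')
--     res = res.replace('u', 'apa')
--     return res
-- ===== Notes on version B (the rewrite author's own statement) =====
-- stated objective: faster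
-- what changed: Replaces the index-based per-character while loop with if/elif chain by five staged whole-string replace passes, one per vowel, ordered so that later passes never touch text inserted by earlier ones.
import Mathlib
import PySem

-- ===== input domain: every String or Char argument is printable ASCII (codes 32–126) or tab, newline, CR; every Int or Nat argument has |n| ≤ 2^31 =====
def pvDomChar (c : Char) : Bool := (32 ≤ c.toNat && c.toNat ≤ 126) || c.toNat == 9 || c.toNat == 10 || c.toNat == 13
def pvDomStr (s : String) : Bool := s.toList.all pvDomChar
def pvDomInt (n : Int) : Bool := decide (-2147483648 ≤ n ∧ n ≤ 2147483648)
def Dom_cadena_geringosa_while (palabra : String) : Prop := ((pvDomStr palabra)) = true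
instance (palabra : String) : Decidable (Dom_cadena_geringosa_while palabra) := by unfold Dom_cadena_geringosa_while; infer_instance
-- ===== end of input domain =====

-- B replaces A's per-character while loop and if/elif chain with five staged
-- whole-string replace passes ('a' first, so later passes never touch inserted text).

-- ===== PORT A =====
-- the while loop: i runs from 0 while len(palabra) > i, appending to palabra_nueva
def cadenaLoopA (palabra : List Char) (i : Nat) (acc : List Char) : List Char :=
  if h : palabra.length > i then
    let c := palabra[i]
    let acc' :=
      if c = 'a' then acc ++ "apa".toList
      else if c = 'e' then acc ++ "apa".toList
      else if c = 'i' then acc ++ "apa".toList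
      else if c = 'o' then acc ++ "apa".toList
      else if c = 'u' then acc ++ "apa".toList
      else acc ++ [c]
    cadenaLoopA palabra (i + 1) acc'
  else acc
termination_by palabra.length - i

def cadena_geringosa_while (palabra : String) : String :=
  String.mk (cadenaLoopA palabra.toList 0 [])

-- ===== PORT B =====
-- port of s.replace(v, 'apa') for a SINGLE-character pattern v: exact there,
-- since single-char occurrences never overlap (each char is replaced independently)
def replOne (v : Char) (s : List Char) : List Char :=
  s.flatMap (fun c => if c = v then "apa".toList else [c])

-- the five staged replace passes of Source B, in order a, e, i, o, u
def cadena_geringosa_while_alt (palabra : String) : String :=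
  let r1 := replOne 'a' palabra.toList
  let r2 := replOne 'e' r1
  let r3 := replOne 'i' r2
  let r4 := replOne 'o' r3
  String.mk (replOne 'u' r4)

-- ===== PRECONDITION & SPEC =====
def Spec_cadena_geringosa_while (palabra : String) (out : String) : Prop := out = cadena_geringosa_while_alt palabra
instance (palabra : String) (out : String) : Decidable (Spec_cadena_geringosa_while palabra out) := by unfold Spec_cadena_geringosa_while; infer_instance

-- ===== CLAIM (what is proved, stated in full; the proofs are below) =====
def Claim_equal_cadena_geringosa_while : Prop := ∀ (palabra : String), Dom_cadena_geringosa_while palabra → Spec_cadena_geringosa_while palabra (cadena_geringosa_while palabra)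

-- ===== LEMMAS AND PROOFS =====

-- per-character table describing A's if/elif chain
def geringosaTabla (c : Char) : List Char :=
  if c = 'a' ∨ c = 'e' ∨ c = 'i' ∨ c = 'o' ∨ c = 'u' then "apa".toList else [c]

theorem cadenaLoopA_eq (palabra : List Char) (i : Nat) (acc : List Char) :
    cadenaLoopA palabra i acc = acc ++ (palabra.drop i).flatMap geringosaTabla := by
  by_cases h : palabra.length > i
  · rw [cadenaLoopA]
    simp only [h, dif_pos]
    rw [cadenaLoopA_eq palabra (i + 1)]
    have hdrop : palabra.drop i = palabra[i] :: palabra.drop (i + 1) :=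
      List.drop_eq_getElem_cons h
    rw [hdrop]
    simp only [List.flatMap_cons, geringosaTabla]
    split_ifs with h1 h2 h3 h4 h5 <;> simp_all
  · rw [cadenaLoopA]
    simp only [h, dif_neg, not_false_iff]
    rw [List.drop_of_length_le (Nat.le_of_not_lt h)]
    simp
termination_by palabra.length - i

-- what the five staged passes do to ONE character of the input
theorem staged_single (c : Char) :
    replOne 'u' (replOne 'o' (replOne 'i' (replOne 'e' (replOne 'a' [c])))) =
      geringosaTabla c := by
  by_cases ha : c = 'a'
  · subst ha; decide
  by_cases he : c = 'e'
  · subst he; decide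
  by_cases hi : c = 'i'
  · subst hi; decide
  by_cases ho : c = 'o'
  · subst ho; decide
  by_cases hu : c = 'u'
  · subst hu; decide
  simp [replOne, geringosaTabla, ha, he, hi, ho, hu]

theorem replOne_append (v : Char) (x y : List Char) :
    replOne v (x ++ y) = replOne v x ++ replOne v y := by
  simp [replOne]

theorem staged_eq (s : List Char) :
    replOne 'u' (replOne 'o' (replOne 'i' (replOne 'e' (replOne 'a' s)))) =
      s.flatMap geringosaTabla := by
  induction s with
  | nil => rfl
  | cons c cs ih =>
      have h1 : c :: cs = [c] ++ cs := rfl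
      rw [h1, replOne_append, replOne_append, replOne_append, replOne_append,
        replOne_append, staged_single, ih]
      simp

-- ===== VERDICT (by name: the statement is the Claim_ definition above) =====
theorem cadena_geringosa_while_spec : Claim_equal_cadena_geringosa_while := by
  intro palabra _
  unfold Spec_cadena_geringosa_while cadena_geringosa_while cadena_geringosa_while_alt
  show String.mk (cadenaLoopA palabra.toList 0 []) =
    String.mk (replOne 'u' (replOne 'o' (replOne 'i' (replOne 'e' (replOne 'a' palabra.toList)))))
  rw [cadenaLoopA_eq, staged_eq]
  simp
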